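-- pv_equiv track=rewrite | github.com/sourabhck-in/papa_meds | pages/02_Export_Page.py | calculate_max_sessions_per_day
-- ===== SOURCE A (Python) =====
-- from typing import Dict, List, Any, Tuple
--
-- def calculate_max_sessions_per_day(sessions: List[Dict]) -> int:
--     """
--     Calculate the maximum number of sessions per day for a given set of sessions.
--
--     Args:
--         sessions: List of session dictionaries
--
--     Returns:
--         Maximum number of sessions in a single day
--     """
--     if not sessions:
--         return 1  # Minimum 1 session column
--
--     # Group sessions by date
--     sessions_by_date = {}
--     for session in sessions:
--         date_key = session["date"]
--         if date_key not in sessions_by_date: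
--             sessions_by_date[date_key] = 0
--         sessions_by_date[date_key] += 1
--
--     # Return maximum sessions in any single day
--     return max(sessions_by_date.values()) if sessions_by_date else 1
-- ===== SOURCE B (Python) =====
-- def calculate_max_sessions_per_day(sessions):
--     if not sessions:
--         return 1
--     best = 0
--     for session in sessions:
--         count = sum(1 for other in sessions if other["date"] == session["date"])
--         if count > best:
--             best = count
--     return best
-- ===== Notes on version B (the rewrite author's own statement) =====
-- stated objective: alternative
-- what changed: Replaces the per-date frequency dictionary and max over its values with a dictionary-free nested scan: for each session, count how many sessions share its date, keeping the running maximum.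
import Mathlib
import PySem

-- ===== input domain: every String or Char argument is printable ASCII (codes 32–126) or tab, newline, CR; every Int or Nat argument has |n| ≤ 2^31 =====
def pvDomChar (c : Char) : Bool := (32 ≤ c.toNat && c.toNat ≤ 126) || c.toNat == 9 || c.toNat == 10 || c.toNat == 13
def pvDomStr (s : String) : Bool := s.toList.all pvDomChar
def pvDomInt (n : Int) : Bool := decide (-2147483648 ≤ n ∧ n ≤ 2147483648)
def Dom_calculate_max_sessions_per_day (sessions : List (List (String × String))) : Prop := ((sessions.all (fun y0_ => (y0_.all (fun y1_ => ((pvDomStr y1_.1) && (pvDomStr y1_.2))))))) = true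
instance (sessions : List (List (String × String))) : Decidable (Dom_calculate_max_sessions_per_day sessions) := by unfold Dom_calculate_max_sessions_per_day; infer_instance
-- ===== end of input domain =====

-- B drops A's per-date frequency dictionary and instead, for each session, counts the
-- sessions sharing its date in a nested scan, keeping a running maximum (alternative, not faster).

-- session["date"]: first match in the association list; Pre_ guarantees the key is present,
-- so the "" default is never the value actually used on admitted inputs
def dateOf (s : List (String × String)) : String := (List.lookup "date" s).getD ""

-- ===== PORT A =====
def calculate_max_sessions_per_day (sessions : List (List (String × String))) : Int :=
  if sessions = [] then 1
  else
    -- sessions_by_date = {}; for session in sessions: setdefault-to-0 then += 1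
    let d : PySem.Dict String Int :=
      sessions.foldl (fun d s =>
        let k := dateOf s
        let d := if PySem.Dict.contains d k then d else PySem.Dict.insert d k 0
        PySem.Dict.insert d k (PySem.Dict.getD d k 0 + 1)) PySem.Dict.empty
    -- max(sessions_by_date.values()) if sessions_by_date else 1
    if (PySem.Dict.items d) = [] then 1
    else
      match PySem.List.max? (PySem.Dict.values d) (fun y => y) with
      | some m => m
      | none => 1

-- ===== PORT B =====
def calculate_max_sessions_per_day_alt (sessions : List (List (String × String))) : Int :=
  if sessions = [] then 1
  else
    sessions.foldl (fun best s =>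
      let count : Int :=
        sessions.foldl (fun acc t => if dateOf t == dateOf s then acc + 1 else acc) 0
      if count > best then count else best) 0

-- ===== PRECONDITION & SPEC =====
-- Pre_ excludes exactly the inputs where the Python A raises KeyError: a session without a "date" key.
def Pre_calculate_max_sessions_per_day (sessions : List (List (String × String))) : Prop :=
  (sessions.all (fun s => s.any (fun p => p.1 == "date"))) = true
instance (sessions : List (List (String × String))) : Decidable (Pre_calculate_max_sessions_per_day sessions) := by unfold Pre_calculate_max_sessions_per_day; infer_instance

def pvWitness_calculate_max_sessions_per_day : (List (List (String × String))) :=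
  [[("date", "2024-01-01")], [("date", "2024-01-01")], [("date", "2024-01-02")]]

def Spec_calculate_max_sessions_per_day (sessions : List (List (String × String))) (out : Int) : Prop := out = calculate_max_sessions_per_day_alt sessions
instance (sessions : List (List (String × String))) (out : Int) : Decidable (Spec_calculate_max_sessions_per_day sessions out) := by unfold Spec_calculate_max_sessions_per_day; infer_instance

-- ===== CLAIM (what is proved, stated in full; the proofs are below) =====
def Claim_equal_calculate_max_sessions_per_day : Prop := ∀ (sessions : List (List (String × String))), Dom_calculate_max_sessions_per_day sessions → Pre_calculate_max_sessions_per_day sessions → Spec_calculate_max_sessions_per_day sessions (calculate_max_sessions_per_day sessions)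

-- ===== LEMMAS AND PROOFS =====

-- A's loop body (setdefault-to-0 then increment) is one counting insert.
lemma stepA_eq (d : PySem.Dict String Int) (k : String) :
    (PySem.Dict.insert (if PySem.Dict.contains d k then d else PySem.Dict.insert d k 0) k
      (PySem.Dict.getD (if PySem.Dict.contains d k then d else PySem.Dict.insert d k 0) k 0 + 1))
    = PySem.Dict.insert d k (PySem.Dict.getD d k 0 + 1) := by
  by_cases h : PySem.Dict.contains d k
  · simp [h]
  · simp only [h, if_false, Bool.false_eq_true]
    rw [PySem.Dict.getD_insert_self, PySem.Dict.insert_insert_self,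
        PySem.Dict.getD_of_not_contains _ _ (by simpa using h)]

lemma le_foldl_max_init (l : List Int) (a : Int) : a ≤ l.foldl max a := by
  induction l generalizing a with
  | nil => exact le_refl a
  | cons x t ih => exact le_trans (le_max_left a x) (ih (max a x))

lemma le_foldl_max_of_mem (l : List Int) : ∀ (a x : Int), x ∈ l → x ≤ l.foldl max a := by
  induction l with
  | nil => intro a x hx; cases hx
  | cons y t ih =>
    intro a x hx
    rcases List.mem_cons.mp hx with rfl | hx'
    · exact le_trans (le_max_right a x) (le_foldl_max_init t (max a x))
    · exact ih (max a y) x hx' 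

lemma foldl_max_mem (l : List Int) (a : Int) : l.foldl max a = a ∨ l.foldl max a ∈ l := by
  induction l generalizing a with
  | nil => exact Or.inl rfl
  | cons x t ih =>
    simp only [List.foldl_cons]
    rcases ih (max a x) with h | h
    · rw [h]
      rcases max_cases a x with ⟨he, _⟩ | ⟨he, _⟩
      · exact Or.inl he
      · exact Or.inr (by rw [he]; exact List.mem_cons_self)
    · exact Or.inr (List.mem_cons_of_mem x h)

-- the two running maxima agree when the scanned lists have the same members,
-- the first base is a member, and every member dominates the second base 0
lemma foldl_max_eq_of_mem_iff (a1 : Int) (t1 l2 : List Int)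
    (hmem : ∀ x, x ∈ (a1 :: t1) ↔ x ∈ l2)
    (hpos : ∀ x ∈ l2, 0 < x) :
    t1.foldl max a1 = l2.foldl max 0 := by
  have hr1 : t1.foldl max a1 ∈ l2 := by
    rw [← hmem]
    rcases foldl_max_mem t1 a1 with h | h
    · rw [h]; exact List.mem_cons_self
    · exact List.mem_cons_of_mem a1 h
  have hr2 : l2.foldl max 0 ∈ l2 := by
    rcases foldl_max_mem l2 0 with h | h
    · exfalso
      have h1 := le_foldl_max_of_mem l2 0 _ hr1
      have h2 := hpos _ hr1
      omega
    · exact h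
  have hle1 : t1.foldl max a1 ≤ l2.foldl max 0 := le_foldl_max_of_mem l2 0 _ hr1
  have hle2 : l2.foldl max 0 ≤ t1.foldl max a1 := by
    rcases List.mem_cons.mp ((hmem _).mpr hr2) with h | h
    · exact h ▸ le_foldl_max_init t1 a1
    · exact le_foldl_max_of_mem t1 a1 _ h
  omega

-- ===== VERDICT (by name: the statement is the Claim_ definition above) =====
theorem calculate_max_sessions_per_day_spec : Claim_equal_calculate_max_sessions_per_day := by
  intro sessions _hdom _hpre
  unfold Spec_calculate_max_sessions_per_day
  unfold calculate_max_sessions_per_day calculate_max_sessions_per_day_alt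
  by_cases hnil : sessions = []
  · simp [hnil]
  · simp only [hnil, if_false]
    set ds : List String := sessions.map dateOf with hds
    have hdsne : ds ≠ [] := by simpa [hds] using hnil
    set f : String → Int := fun v => (ds.count v : Int) with hf
    -- A's dict is counter ds
    have hfold : sessions.foldl (fun d s =>
        let k := dateOf s
        let d := if PySem.Dict.contains d k then d else PySem.Dict.insert d k 0
        PySem.Dict.insert d k (PySem.Dict.getD d k 0 + 1)) PySem.Dict.empty
        = PySem.Dict.counter ds := by
      refine Eq.trans (PySem.List.foldl_congr_mem sessions _
        (fun d s => PySem.Dict.insert d (dateOf s) (PySem.Dict.getD d (dateOf s) 0 + 1))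
        PySem.Dict.empty (fun acc x _ => stepA_eq acc (dateOf x))) ?_
      rw [hds, ← PySem.Dict.foldl_insert_getD_add_one_eq_counter, List.foldl_map]
    simp only [hfold]
    -- A's values are the per-distinct-date counts
    have hvals : PySem.Dict.values (PySem.Dict.counter ds) = (PySem.Set.ofList ds).map f := by
      simp only [PySem.Dict.values, PySem.Dict.items_counter, List.map_map]
      rfl
    obtain ⟨h0, t0, hcons⟩ := List.exists_cons_of_ne_nil
      (show (PySem.Set.ofList ds : List String) ≠ [] by
        intro he
        rcases List.exists_cons_of_ne_nil hdsne with ⟨x, xs, hx⟩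
        have : x ∈ (PySem.Set.ofList ds : List String) :=
          (PySem.Set.mem_ofList ds x).mpr (by rw [hx]; exact List.mem_cons_self)
        simp [he] at this)
    have hitems : PySem.Dict.items (PySem.Dict.counter ds) ≠ [] := by
      rw [PySem.Dict.items_counter, hcons]; simp
    simp only [if_neg hitems, hvals, hcons, List.map_cons, PySem.List.max?_id_cons]
    -- B's inner loop counts the sessions with the same date; outer loop is a running max
    have hB : sessions.foldl (fun best s =>
        let count : Int :=
          sessions.foldl (fun acc t => if dateOf t == dateOf s then acc + 1 else acc) 0
        if count > best then count else best) 0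
        = (ds.map f).foldl max 0 := by
      have hcnt : ∀ s, sessions.foldl
          (fun acc t => if dateOf t == dateOf s then acc + 1 else acc) 0 = f (dateOf s) := by
        intro s
        rw [PySem.List.foldl_if_add_one]
        simp [hf, hds, List.count, List.countP_map, Function.comp_def]
      refine Eq.trans (PySem.List.foldl_congr_mem sessions _
        (fun best s => max best (f (dateOf s))) 0 ?_) ?_
      · intro acc x _
        simp only [hcnt x]
        rcases lt_or_ge acc (f (dateOf x)) with h | h
        · rw [if_pos h, max_eq_right h.le]
        · rw [if_neg (not_lt.mpr h), max_eq_left h]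
      · rw [hds, List.map_map, List.foldl_map]
        rfl
    rw [hB]
    -- the max over distinct dates' counts equals the max over all sessions' counts
    apply foldl_max_eq_of_mem_iff
    · intro x
      rw [show (f h0 :: t0.map f) = (PySem.Set.ofList ds).map f by rw [hcons]; rfl]
      simp only [List.mem_map, PySem.Set.mem_ofList]
    · intro x hx
      rcases List.mem_map.mp hx with ⟨v, hv, rfl⟩
      have : 0 < ds.count v := List.count_pos_iff.mpr hv
      simp [hf]
      omega
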